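-- pv_equiv track=rewrite | github.com/Charlene393/Cryptography | Modular Arithmetic/adrienSigns.py | descrypt_flag
-- ===== SOURCE A (Python) =====
-- p = 1007621497415251
--
-- def descrypt_flag(hehe):
--     plaintext = []
--     for i in hehe:
--         if pow(i, (p - 1) // 2, p) == 1:
--             plaintext.append('1')
--         else:
--             plaintext.append('0')
--     plaintext = ''.join(plaintext)
--     reversed(plaintext)
--     plaintext = ''.join([chr(int(plaintext[i:i + 8], 2)) for i in range(0, len(plaintext), 8)])
--     return plaintext
-- ===== SOURCE B (Python) =====
-- p = 1007621497415251
-- _E = (p - 1) // 2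
--
-- def descrypt_flag(hehe):
--     out = []
--     acc = 0
--     n = 0
--     for i in hehe:
--         acc = acc * 2 + (1 if pow(i, _E, p) == 1 else 0)
--         n += 1
--         if n == 8:
--             out.append(chr(acc))
--             acc = 0
--             n = 0
--     if n > 0:
--         out.append(chr(acc))
--     return ''.join(out)
-- ===== Notes on version B (the rewrite author's own statement) =====
-- stated objective: alternative
-- what changed: Single pass with an integer accumulator and bit counter, emitting a char every 8 bits and flushing the leftover partial byte, instead of building an intermediate '0'/'1' string and re-parsing its 8-char slices with int(s,2).
import Mathlib
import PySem

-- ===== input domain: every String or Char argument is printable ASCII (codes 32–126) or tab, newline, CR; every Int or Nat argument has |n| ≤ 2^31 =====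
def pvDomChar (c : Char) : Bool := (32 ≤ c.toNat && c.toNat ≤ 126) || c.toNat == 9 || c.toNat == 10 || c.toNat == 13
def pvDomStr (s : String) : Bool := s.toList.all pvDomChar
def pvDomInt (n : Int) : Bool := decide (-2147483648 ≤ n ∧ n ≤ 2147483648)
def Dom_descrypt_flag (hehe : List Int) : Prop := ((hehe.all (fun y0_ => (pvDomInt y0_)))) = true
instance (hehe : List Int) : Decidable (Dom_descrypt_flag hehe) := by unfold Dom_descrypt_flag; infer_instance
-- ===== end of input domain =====

-- B decodes the same Legendre-symbol bits in one streaming pass (accumulator + bit counter, flushing the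
-- leftover partial byte) instead of A's intermediate '0'/'1' string re-parsed slice by slice; alternative
-- decomposition, same asymptotic cost.

-- ===== PORT A =====
def pvP : Int := 1007621497415251
def pvE : Nat := 503810748707625   -- (p - 1) // 2

-- Python pow(b, e, m) for m > 0, by binary exponentiation.  PySem.Int.powMod computes the same value as
-- (b ^ e) % m, which is not kernel/eval-feasible for this 2^49-sized exponent; for m > 0 Lean's Int '%'
-- coincides with Python's, so this is exact there.  Shared by both ports as the model of the builtin pow.
def pvModPow (b : Int) (e : Nat) (m : Int) : Int :=
  if e = 0 then 1 % m
  else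
    let h := pvModPow b (e / 2) m
    let h2 := h * h % m
    if e % 2 = 1 then h2 * (b % m) % m else h2

-- the '1'/'0' character A appends for one element
def pvCh (i : Int) : Char := if pvModPow i pvE pvP == 1 then '1' else '0'

-- int(s, 2): exact for the nonempty '0'/'1' strings A feeds it (no sign/whitespace/underscore ever occurs)
def pvBin (cs : List Char) : Nat := cs.foldl (fun a c => a * 2 + (if c == '1' then 1 else 0)) 0

def descrypt_flag (hehe : List Int) : String :=
  let plaintext := hehe.map pvCh
  -- 'reversed(plaintext)' in the source builds an iterator that is discarded: no effect
  String.mk ((PySem.List.pyRange 0 (plaintext.length : Int) 8).map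
    (fun i => Char.ofNat (pvBin (PySem.List.slice plaintext (some i) (some (i + 8))))))

-- ===== PORT B =====
-- the for-loop of Source B over the state (out, acc, n); the final 'if n > 0' flush is the nil case
def pvAltLoop : List Int → List Char → Nat → Nat → List Char
  | [], out, acc, n => if n > 0 then out ++ [Char.ofNat acc] else out
  | i :: rest, out, acc, n =>
    let acc' := acc * 2 + (if pvModPow i pvE pvP == 1 then 1 else 0)
    let n' := n + 1
    if n' == 8 then pvAltLoop rest (out ++ [Char.ofNat acc']) 0 0
    else pvAltLoop rest out acc' n'

def descrypt_flag_alt (hehe : List Int) : String := String.mk (pvAltLoop hehe [] 0 0)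

-- ===== PRECONDITION & SPEC =====
def Spec_descrypt_flag (hehe : List Int) (out : String) : Prop := out = descrypt_flag_alt hehe
instance (hehe : List Int) (out : String) : Decidable (Spec_descrypt_flag hehe out) := by unfold Spec_descrypt_flag; infer_instance

-- ===== CLAIM (what is proved, stated in full; the proofs are below) =====
def Claim_equal_descrypt_flag : Prop := ∀ (hehe : List Int), Dom_descrypt_flag hehe → Spec_descrypt_flag hehe (descrypt_flag hehe)

-- ===== LEMMAS AND PROOFS =====

-- the common form both ports are reduced to: chunks of 8 bits, front to back
def pvChunk (cs : List Char) : List Char :=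
  if h : cs = [] then []
  else Char.ofNat (pvBin (cs.take 8)) :: pvChunk (cs.drop 8)
termination_by cs.length
decreasing_by
  cases cs with
  | nil => exact absurd rfl h
  | cons a t => simp

lemma pvChunk_nil : pvChunk [] = [] := by simp [pvChunk]

lemma pvChunk_cons (cs : List Char) (h : cs ≠ []) :
    pvChunk cs = Char.ofNat (pvBin (cs.take 8)) :: pvChunk (cs.drop 8) := by
  rw [pvChunk]; simp [h]

-- A's range(0, len, 8)-of-slices loop computes pvChunk
lemma A_eq_chunk : ∀ cs : List Char,
    (PySem.List.pyRange 0 (cs.length : Int) 8).map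
      (fun i => Char.ofNat (pvBin (PySem.List.slice cs (some i) (some (i + 8))))) = pvChunk cs := by
  intro cs
  rw [PySem.List.pyRange_of_pos 0 (cs.length : Int) (by norm_num), List.map_map]
  have hcnt : (if (0:Int) < (cs.length : Int) then (((cs.length : Int) - 0 + 8 - 1) / 8).toNat else 0)
      = (cs.length + 7) / 8 := by
    by_cases h : 0 < cs.length
    · have h1 : ((cs.length : Int) - 0 + 8 - 1) = ((cs.length + 7 : Nat) : Int) := by push_cast; ring
      rw [if_pos (by exact_mod_cast h), h1,
        show ((8:Int)) = ((8:Nat):Int) from rfl, ← Int.natCast_div, Int.toNat_natCast]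
    · have h0 : cs.length = 0 := by omega
      simp [h0]
  rw [hcnt]
  suffices h : ∀ (n : Nat) (ds : List Char), n = (ds.length + 7) / 8 →
      (List.range n).map
        ((fun i => Char.ofNat (pvBin (PySem.List.slice ds (some i) (some (i + 8))))) ∘
          (fun (k : Nat) => (0:Int) + 8 * (k : Int)))
        = pvChunk ds by
    exact h _ cs rfl
  intro n
  induction n with
  | zero =>
      intro ds hds
      have hds0 : ds = [] := by
        cases ds with
        | nil => rfl
        | cons a t => simp at hds; omega
      simp [hds0, pvChunk_nil]
  | succ m ih =>
      intro ds hds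
      have hne : ds ≠ [] := by
        intro h; rw [h] at hds; simp at hds
      rw [List.range_succ_eq_map, List.map_cons, List.map_map, pvChunk_cons ds hne]
      refine congrArg₂ List.cons ?_ ?_
      · -- head chunk: slice ds [0 : 8] = take 8
        simp only [Function.comp_apply]
        congr 1
        have h0 : ((0:Int) + 8 * ((0:Nat) : Int)) = (((0:Nat)) : Int) := by norm_num
        rw [h0, show ((((0:Nat)):Int) + 8) = (((0:Nat)):Int) + ((8:Nat):Int) from by norm_num,
          PySem.List.slice_natCast_add]
        simp
      · -- remaining chunks: shift everything by one chunk of 8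
        have ht := ih (ds.drop 8) (by
          have hlen : (ds.drop 8).length = ds.length - 8 := by simp
          omega)
        rw [← ht]
        apply List.map_congr_left
        intro k _
        simp only [Function.comp_apply, Nat.succ_eq_add_one]
        congr 1
        have hL : ((0:Int) + 8 * (((k+1 : Nat)) : Int)) = ((8*k+8 : Nat) : Int) := by push_cast; ring
        have hR : (((8*k+8 : Nat) : Int) + 8) = ((8*k+8 : Nat) : Int) + ((8:Nat) : Int) := by push_cast; ring
        have hL' : ((0:Int) + 8 * ((k : Nat) : Int)) = ((8*k : Nat) : Int) := by push_cast; ring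
        have hR' : (((8*k : Nat) : Int) + 8) = ((8*k : Nat) : Int) + ((8:Nat) : Int) := by push_cast; ring
        rw [hL, hR, PySem.List.slice_natCast_add, hL', hR', PySem.List.slice_natCast_add, List.drop_drop]
        rw [Nat.add_comm 8 (8 * k)]

lemma pvBin_append_singleton (cs : List Char) (c : Char) :
    pvBin (cs ++ [c]) = pvBin cs * 2 + (if c == '1' then 1 else 0) := by
  simp [pvBin]

lemma pvCh_bit (i : Int) :
    (if pvCh i == '1' then (1:Nat) else 0) = (if pvModPow i pvE pvP == 1 then 1 else 0) := by
  unfold pvCh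
  by_cases h : pvModPow i pvE pvP == 1 <;> simp [h]

lemma pvBin_nil : pvBin [] = 0 := rfl

-- loop invariant for B: with the accumulator holding the bits 'pre' already read in the current byte,
-- the loop finishes the chunking of pre ++ (remaining bits)
lemma altLoop_inv : ∀ (l : List Int) (pre : List Char) (out : List Char), pre.length < 8 →
    pvAltLoop l out (pvBin pre) pre.length = out ++ pvChunk (pre ++ l.map pvCh) := by
  intro l
  induction l with
  | nil =>
      intro pre out hlt
      simp only [List.map_nil, List.append_nil, pvAltLoop]
      by_cases hpre : pre = []
      · simp [hpre, pvChunk_nil]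
      · have hpos : 0 < pre.length := List.length_pos_iff.mpr hpre
        rw [if_pos hpos, pvChunk_cons pre hpre]
        rw [List.take_of_length_le (by omega), List.drop_eq_nil_of_le (by omega), pvChunk_nil]
  | cons i rest ih =>
      intro pre out hlt
      simp only [pvAltLoop]
      have hacc : pvBin pre * 2 + (if pvModPow i pvE pvP == 1 then 1 else 0)
          = pvBin (pre ++ [pvCh i]) := by
        rw [pvBin_append_singleton, pvCh_bit]
      by_cases h7 : pre.length = 7
      · have hc : (pre.length + 1 == 8) = true := by simp [h7]
        rw [hc, if_pos rfl, hacc]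
        have h0 := ih [] (out ++ [Char.ofNat (pvBin (pre ++ [pvCh i]))]) (by norm_num)
        rw [pvBin_nil] at h0
        simp only [List.length_nil, List.nil_append] at h0
        rw [h0]
        rw [show pre ++ List.map pvCh (i :: rest) = (pre ++ [pvCh i]) ++ List.map pvCh rest from by simp]
        rw [pvChunk_cons (pre ++ [pvCh i] ++ List.map pvCh rest) (by simp)]
        have hlen8 : (pre ++ [pvCh i]).length = 8 := by simp [h7]
        rw [List.take_append_of_le_length (by omega), List.take_of_length_le (by omega)]
        rw [List.drop_append_of_le_length (by omega), List.drop_eq_nil_of_le (by omega), List.nil_append]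
        simp
      · have hc : (pre.length + 1 == 8) = false := by simp; omega
        rw [hc]
        simp only [Bool.false_eq_true, if_false]
        have h1 : pre.length + 1 = (pre ++ [pvCh i]).length := by simp
        rw [hacc, h1, ih (pre ++ [pvCh i]) out (by simp; omega)]
        simp

-- ===== VERDICT (by name: the statement is the Claim_ definition above) =====
theorem descrypt_flag_spec : Claim_equal_descrypt_flag := by
  intro hehe _
  unfold Spec_descrypt_flag
  have hB : descrypt_flag_alt hehe = String.mk (pvChunk (hehe.map pvCh)) := by
    have h := altLoop_inv hehe [] [] (by norm_num)
    rw [pvBin_nil] at h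
    simp only [List.length_nil, List.nil_append] at h
    exact congrArg String.mk h
  have hA : descrypt_flag hehe = String.mk (pvChunk (hehe.map pvCh)) :=
    congrArg String.mk (A_eq_chunk (hehe.map pvCh))
  rw [hA, hB]
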